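-- pv_equiv track=rewrite | github.com/shadowbringer1/text2sparql | seq2seq/metrics/lc_quad_1/post_process.py | process
-- ===== SOURCE A (Python) =====
-- def process(string):
--     vocab=['?x','{','}','?uri','SELECT', 'DISTINCT', 'COUNT', '(', ')','WHERE',
--            '<http://www.w3.org/1999/02/22-rdf-syntax-ns#type>', '.','ASK','[DEF]',
--            '<http://dbpedia.org/ontology/', '<http://dbpedia.org/property/',
--            '<http://dbpedia.org/resource/']
--
--     vocab_dict = {}
--     for i,text in enumerate(vocab):
--         vocab_dict['<extra_id_'+str(i)+'>'] = text
--
--     for key in vocab_dict: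
--         string = string.replace(key, ' '+vocab_dict[key]+' ')
--
--     variable = ['<http://dbpedia.org/ontology/', '<http://dbpedia.org/property/',
--                 '<http://dbpedia.org/resource/']
--
--     vals = string.split()
--     for i,val in enumerate(vals):
--         if val in variable:
--             if i < len(vals)-1:
--                 vals[i] = val+vals[i+1]+'>'
--                 vals[i+1] = ''
--
--     string = ' '.join(vals).strip()
--
--     return ' '.join(string.split())
-- ===== SOURCE B (Python) =====
-- def process(string):
--     vocab=['?x','{','}','?uri','SELECT', 'DISTINCT', 'COUNT', '(', ')','WHERE',
--            '<http://www.w3.org/1999/02/22-rdf-syntax-ns#type>', '.','ASK','[DEF]',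
--            '<http://dbpedia.org/ontology/', '<http://dbpedia.org/property/',
--            '<http://dbpedia.org/resource/']
--
--     vocab_dict = {}
--     for i,text in enumerate(vocab):
--         vocab_dict['<extra_id_'+str(i)+'>'] = text
--
--     for key in vocab_dict:
--         string = string.replace(key, ' '+vocab_dict[key]+' ')
--
--     prefixes = ['<http://dbpedia.org/ontology/', '<http://dbpedia.org/property/',
--                 '<http://dbpedia.org/resource/']
--
--     # single pass consuming token pairs: a prefix token absorbs the following
--     # token at once, so no blank slots and no second normalization pass needed
--     res = []
--     it = iter(string.split())
--     for t in it:
--         if t in prefixes: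
--             nxt = next(it, None)
--             if nxt is None:
--                 res.append(t)
--             else:
--                 res.append(t + nxt + '>')
--         else:
--             res.append(t)
--     return ' '.join(res)
-- ===== Notes on version B (the rewrite author's own statement) =====
-- stated objective: simpler
-- what changed: The prefix-merge phase is rewritten as a single forward pass that consumes a prefix token together with its following token in one step, replacing A's index-mutation loop that blanks out slots in place and then needs a second join/strip/split pass to squeeze the blanks out.
import Mathlib
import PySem

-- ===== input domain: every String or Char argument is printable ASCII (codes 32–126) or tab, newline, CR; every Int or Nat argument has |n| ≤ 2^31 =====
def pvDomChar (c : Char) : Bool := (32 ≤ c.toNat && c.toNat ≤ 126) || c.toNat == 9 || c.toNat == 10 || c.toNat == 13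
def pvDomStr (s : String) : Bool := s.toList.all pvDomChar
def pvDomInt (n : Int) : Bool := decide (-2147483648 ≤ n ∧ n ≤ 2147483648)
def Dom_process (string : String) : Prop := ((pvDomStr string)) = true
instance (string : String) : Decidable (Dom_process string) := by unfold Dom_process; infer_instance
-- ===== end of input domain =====

-- B keeps A's extra_id-substitution phase and replaces the prefix-merge phase by a single
-- forward pass that consumes a prefix token together with its successor, instead of A's
-- index-mutation loop with blank slots plus a second join/strip/split normalization (objective: simpler).

-- ===== PORT A =====
-- the vocab literal and the substitution phase are IDENTICAL lines in A and B, shared as helpers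
def pvVocab : List String :=
  ["?x", "{", "}", "?uri", "SELECT", "DISTINCT", "COUNT", "(", ")", "WHERE",
   "<http://www.w3.org/1999/02/22-rdf-syntax-ns#type>", ".", "ASK", "[DEF]",
   "<http://dbpedia.org/ontology/", "<http://dbpedia.org/property/",
   "<http://dbpedia.org/resource/"]

def pvSubst (string : String) : String :=
  let vocabDict : PySem.Dict String String :=
    (PySem.List.enumerate pvVocab).foldl
      (fun d p => d.insert ("<extra_id_" ++ PySem.Int.toStr p.1 ++ ">") p.2) PySem.Dict.empty
  vocabDict.keys.foldl
    (fun st key => PySem.Str.replace st key (" " ++ vocabDict.getD key "" ++ " ")) string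

def pvPrefixes : List String :=
  ["<http://dbpedia.org/ontology/", "<http://dbpedia.org/property/",
   "<http://dbpedia.org/resource/"]

-- the body of A's `for i,val in enumerate(vals)` loop (mutating vals in place)
def pvStep (vs : List String) (i : Nat) : List String :=
  let val := vs.getD i ""
  if val ∈ pvPrefixes then
    if i + 1 < vs.length then
      (vs.set i (val ++ vs.getD (i + 1) "" ++ ">")).set (i + 1) ""
    else vs
  else vs

def process (string : String) : String :=
  let string1 := pvSubst string
  let vals := PySem.Str.split₀ string1
  let vals2 := (List.range vals.length).foldl pvStep vals
  let string2 := PySem.Str.strip (PySem.Str.join " " vals2)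
  PySem.Str.join " " (PySem.Str.split₀ string2)

-- ===== PORT B =====
-- B's `for t in it` pass with `next(it, None)`: a prefix token absorbs the following token
def pvMerge : List String → List String
  | [] => []
  | t :: rest =>
    if t ∈ pvPrefixes then
      match rest with
      | [] => [t]
      | u :: r => (t ++ u ++ ">") :: pvMerge r
    else t :: pvMerge rest

def process_alt (string : String) : String :=
  let string1 := pvSubst string
  PySem.Str.join " " (pvMerge (PySem.Str.split₀ string1))

-- ===== PRECONDITION & SPEC =====
def Spec_process (string : String) (out : String) : Prop := out = process_alt string
instance (string : String) (out : String) : Decidable (Spec_process string out) := by unfold Spec_process; infer_instance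

-- ===== CLAIM (what is proved, stated in full; the proofs are below) =====
def Claim_equal_process : Prop := ∀ (string : String), Dom_process string → Spec_process string (process string)

-- ===== LEMMAS AND PROOFS =====

def pvGA : List String → List String
  | [] => []
  | t :: rest =>
    if t ∈ pvPrefixes then
      match rest with
      | [] => [t]
      | u :: r => (t ++ u ++ ">") :: "" :: pvGA r
    else t :: pvGA rest

def pvNoSpace (w : List Char) : Prop := ∀ c ∈ w, PySem.Chars.isspace c = false

theorem pv_go_word (w : List Char) (hw : pvNoSpace w) (rest cur acc) :
    PySem.Chars.split₀.go (w ++ rest) cur acc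
      = PySem.Chars.split₀.go rest (w.reverse ++ cur) acc := by
  induction w generalizing cur with
  | nil => simp
  | cons c w ih =>
    have hc : PySem.Chars.isspace c = false := hw c (by simp)
    have hw' : pvNoSpace w := fun d hd => hw d (by simp [hd])
    simp only [List.cons_append, PySem.Chars.split₀.go, hc, Bool.false_eq_true, if_false]
    rw [ih hw' (c :: cur)]
    simp

theorem pv_go_spaces_nil (ws : List Char) (hws : ∀ c ∈ ws, PySem.Chars.isspace c = true)
    (cur acc) : PySem.Chars.split₀.go ws cur acc = PySem.Chars.split₀.go [] cur acc := by
  induction ws generalizing cur acc with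
  | nil => rfl
  | cons c ws ih =>
    have hc := hws c (by simp)
    have hws' : ∀ d ∈ ws, PySem.Chars.isspace d = true := fun d hd => hws d (by simp [hd])
    simp only [PySem.Chars.split₀.go, hc, if_true]
    by_cases hcur : cur.isEmpty
    · simp only [hcur, if_true]
      rw [ih hws']
      simp_all [PySem.Chars.split₀.go, List.isEmpty_iff]
    · simp only [hcur, Bool.false_eq_true, if_false]
      rw [ih hws']
      simp_all [PySem.Chars.split₀.go, List.isEmpty_iff]
theorem pv_go_spaces (ws : List Char) (hws : ∀ c ∈ ws, PySem.Chars.isspace c = true)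
    (a cur acc) : PySem.Chars.split₀.go (a ++ ws) cur acc = PySem.Chars.split₀.go a cur acc := by
  induction a generalizing cur acc with
  | nil => simpa using pv_go_spaces_nil ws hws cur acc
  | cons c a ih =>
    simp only [List.cons_append, PySem.Chars.split₀.go]
    by_cases hc : PySem.Chars.isspace c <;> by_cases hcur : cur.isEmpty <;>
      simp [hc, hcur, ih]

theorem pv_split₀_lstrip (s : List Char) :
    PySem.Chars.split₀ (PySem.Chars.lstrip s) = PySem.Chars.split₀ s := by
  unfold PySem.Chars.split₀ PySem.Chars.lstrip
  induction s with
  | nil => rfl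
  | cons c s ih =>
    by_cases hc : PySem.Chars.isspace c
    · simpa [hc, PySem.Chars.split₀.go] using ih
    · simp [List.dropWhile_cons, hc]

theorem pv_split₀_strip (s : List Char) :
    PySem.Chars.split₀ (PySem.Chars.strip s) = PySem.Chars.split₀ s := by
  unfold PySem.Chars.strip
  rw [← pv_split₀_lstrip s]
  set t := PySem.Chars.lstrip s with ht
  unfold PySem.Chars.rstrip
  have hdecomp : t = (t.reverse.dropWhile PySem.Chars.isspace).reverse
      ++ (t.reverse.takeWhile PySem.Chars.isspace).reverse := by
    have h2 := List.takeWhile_append_dropWhile (p := PySem.Chars.isspace) (l := t.reverse)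
    rw [← List.reverse_append, h2, List.reverse_reverse]
  conv_rhs => rw [hdecomp]
  unfold PySem.Chars.split₀
  rw [pv_go_spaces]
  intro c hc
  have := List.mem_reverse.mp hc
  exact List.mem_takeWhile_imp this
theorem pv_go_intercalate (parts : List (List Char)) (h : ∀ p ∈ parts, pvNoSpace p) (acc) :
    PySem.Chars.split₀.go ([' '].intercalate parts) [] acc
      = acc.reverse ++ parts.filter (fun p => !(p == [])) := by
  induction parts generalizing acc with
  | nil => simp [List.intercalate, PySem.Chars.split₀.go]
  | cons p rest ih =>
    have hp : pvNoSpace p := h p (by simp)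
    have h' : ∀ q ∈ rest, pvNoSpace q := fun q hq => h q (by simp [hq])
    cases rest with
    | nil =>
      have : [' '].intercalate [p] = p := by simp [List.intercalate]
      rw [this, ← List.append_nil p, pv_go_word p hp]
      by_cases hpe : p = []
      · simp [hpe, PySem.Chars.split₀.go]
      · simp [PySem.Chars.split₀.go, List.isEmpty_iff, hpe]
    | cons q r =>
      have hint : [' '].intercalate (p :: q :: r) = p ++ ((' ' : Char) :: [' '].intercalate (q :: r)) := by
        simp [List.intercalate, List.intersperse]
      rw [hint, pv_go_word p hp]
      have hsp : PySem.Chars.isspace ' ' = true := by decide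
      by_cases hpe : p = []
      · simp only [PySem.Chars.split₀.go, hsp, if_true, hpe, List.reverse_nil, List.nil_append,
          List.isEmpty_nil, if_true]
        rw [ih h']
        simp [hpe]
      · simp only [PySem.Chars.split₀.go, hsp, if_true, List.append_nil]
        rw [if_neg (by simp [List.isEmpty_iff, hpe]), ih h']
        simp [hpe, List.filter_cons]
theorem pv_go_good (s : List Char) (cur : List Char) (acc : List (List Char)) (hcur : pvNoSpace cur)
    (hacc : ∀ w ∈ acc, w ≠ [] ∧ pvNoSpace w) :
    ∀ w ∈ PySem.Chars.split₀.go s cur acc, w ≠ [] ∧ pvNoSpace w := by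
  induction s generalizing cur acc with
  | nil =>
    intro w hw
    simp only [PySem.Chars.split₀.go] at hw
    by_cases hce : cur.isEmpty
    · rw [if_pos hce] at hw; exact hacc w (List.mem_reverse.mp hw)
    · rw [if_neg hce] at hw
      rcases List.mem_cons.mp (List.mem_reverse.mp hw) with h | h
      · subst h
        refine ⟨by simpa [List.isEmpty_iff] using hce, fun c hc => hcur c (List.mem_reverse.mp hc)⟩
      · exact hacc _ h
  | cons c s ih =>
    intro w hw
    simp only [PySem.Chars.split₀.go] at hw
    by_cases hc : PySem.Chars.isspace c
    · rw [if_pos hc] at hw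
      by_cases hce : cur.isEmpty
      · rw [if_pos hce] at hw
        exact ih [] acc (by intro c hc; simp at hc) hacc w hw
      · rw [if_neg hce] at hw
        refine ih [] _ (by intro c hc; simp at hc) ?_ w hw
        intro v hv
        rcases List.mem_cons.mp hv with h | h
        · subst h
          exact ⟨by simpa [List.isEmpty_iff] using hce, fun d hd => hcur d (List.mem_reverse.mp hd)⟩
        · exact hacc _ h
    · rw [if_neg hc] at hw
      refine ih (c :: cur) acc ?_ hacc w hw
      intro d hd
      rcases List.mem_cons.mp hd with h | h
      · simpa [h] using hc
      · exact hcur d h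

theorem pv_split₀_good (s : String) :
    ∀ t ∈ PySem.Str.split₀ s, t ≠ "" ∧ pvNoSpace t.toList := by
  intro t ht
  simp only [PySem.Str.split₀, List.mem_map] at ht
  obtain ⟨w, hw, rfl⟩ := ht
  have := pv_go_good s.toList [] [] (by intro c hc; simp at hc) (by simp) w hw
  refine ⟨?_, by simpa [String.toList_ofList] using this.2⟩
  intro hww
  refine this.1 ?_
  have := congrArg String.toList hww
  simpa [String.toList_ofList] using this

theorem pv_chain (X : List String) (h : ∀ w ∈ X, pvNoSpace w.toList) :
    PySem.Str.split₀ (PySem.Str.strip (PySem.Str.join " " X))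
      = X.filter (fun x => !(x == "")) := by
  simp only [PySem.Str.split₀, PySem.Str.strip, PySem.Str.join, String.toList_ofList]
  rw [pv_split₀_strip]
  have hj : PySem.Chars.join " ".toList (X.map String.toList) = [' '].intercalate (X.map String.toList) := rfl
  rw [hj]
  unfold PySem.Chars.split₀
  rw [pv_go_intercalate _ (by intro p hp; obtain ⟨x, hx, rfl⟩ := List.mem_map.mp hp; exact h x hx)]
  simp only [List.reverse_nil, List.nil_append]
  rw [List.filter_map]
  rw [List.map_map]
  have : ∀ x : String, (fun p => !(p == ([] : List Char))) (x.toList) = !(x == "") := by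
    intro x
    by_cases hx : x = ""
    · simp [hx]
    · have : x.toList ≠ [] := by
        intro hl
        exact hx (by have := congrArg String.ofList hl; simpa [String.ofList_toList] using this)
      rw [show ((fun p => !(p == ([] : List Char))) x.toList) = !(x.toList == []) from rfl]
      rw [show ((x.toList == []) = x.toList.isEmpty) from by simp [List.isEmpty_iff]]
      rw [List.isEmpty_eq_false_iff.mpr this]
      congr 1
      symm
      rw [beq_eq_false_iff_ne]
      exact hx
  have hmap : List.map (String.ofList ∘ String.toList) (List.filter ((fun p => !p == []) ∘ String.toList) X)
      = List.filter ((fun p => !p == []) ∘ String.toList) X := by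
    simp [Function.comp_def, String.ofList_toList]
  rw [hmap]
  exact List.filter_congr (fun x _ => this x)
theorem pv_foldA_front (l pre : List String) :
    List.foldl pvStep (pre ++ l) (List.range' pre.length l.length) = pre ++ pvGA l := by
  induction l using pvGA.induct generalizing pre with
  | case1 => simp [pvGA]
  | case2 t ht =>
    simp only [List.length_cons, List.length_nil, List.range'_succ, List.range'_zero,
      List.foldl_cons, List.foldl_nil, pvGA, ht, if_true]
    have hget : (pre ++ [t]).getD pre.length "" = t := by
      simp [List.getD, List.getElem?_append_right (Nat.le_refl pre.length)]
    simp only [pvStep, hget, ht, if_true]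
    rw [if_neg (by simp)]
  | case3 t ht u r ih =>
    simp only [List.length_cons, List.range'_succ, List.foldl_cons, pvGA, ht, if_true]
    have hget : (pre ++ t :: u :: r).getD pre.length "" = t := by
      simp [List.getD, List.getElem?_append_right (Nat.le_refl pre.length)]
    have hlen : pre.length + 1 < (pre ++ t :: u :: r).length := by simp
    have hstep1 : pvStep (pre ++ t :: u :: r) pre.length = pre ++ (t ++ u ++ ">") :: "" :: r := by
      simp only [pvStep, hget, ht, if_true, if_pos hlen]
      have hget2 : (pre ++ t :: u :: r).getD (pre.length + 1) "" = u := by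
        simp [List.getD, List.getElem?_append_right (Nat.le_succ_of_le (Nat.le_refl pre.length))]
      rw [hget2]
      rw [List.set_append_right _ _ (Nat.le_refl _)]
      simp only [Nat.sub_self, List.set_cons_zero]
      rw [List.set_append_right _ _ (Nat.le_succ_of_le (Nat.le_refl _))]
      congr 1
      simp [Nat.succ_sub (Nat.le_refl pre.length)]
    rw [hstep1]
    have hget3 : (pre ++ (t ++ u ++ ">") :: "" :: r).getD (pre.length + 1) "" = "" := by
      simp [List.getD, List.getElem?_append_right (Nat.le_succ_of_le (Nat.le_refl pre.length))]
    have hstep2 : pvStep (pre ++ (t ++ u ++ ">") :: "" :: r) (pre.length + 1)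
        = pre ++ (t ++ u ++ ">") :: "" :: r := by
      simp only [pvStep, hget3]
      rw [if_neg (by decide)]
    rw [hstep2]
    have h2 := ih (pre ++ [t ++ u ++ ">", ""])
    rw [show (pre ++ [t ++ u ++ ">", ""]) ++ r = pre ++ (t ++ u ++ ">") :: "" :: r from by simp] at h2
    rw [show (pre ++ [t ++ u ++ ">", ""]).length = pre.length + 2 from by simp] at h2
    rw [show pre.length + 1 + 1 = pre.length + 2 from rfl]
    rw [h2]
    simp
  | case4 t rest ht ih =>
    simp only [List.length_cons, List.range'_succ, List.foldl_cons, pvGA, ht, if_false]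
    have hget : (pre ++ t :: rest).getD pre.length "" = t := by
      simp [List.getD, List.getElem?_append_right (Nat.le_refl pre.length)]
    rw [show pvStep (pre ++ t :: rest) pre.length = pre ++ t :: rest from by
      simp [pvStep, hget, ht]]
    have h2 := ih (pre ++ [t])
    rw [show (pre ++ [t]) ++ rest = pre ++ t :: rest from by simp] at h2
    rw [show (pre ++ [t]).length = pre.length + 1 from by simp] at h2
    rw [h2]
    cases rest with
    | nil => simp [pvGA, ht]
    | cons u r => simp [pvGA, ht]

theorem pv_foldA_eq (l : List String) :
    List.foldl pvStep l (List.range l.length) = pvGA l := by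
  have := pv_foldA_front l []
  simpa [List.range_eq_range'] using this
theorem pv_GA_noSpace (toks : List String) (h : ∀ t ∈ toks, pvNoSpace t.toList) :
    ∀ w ∈ pvGA toks, pvNoSpace w.toList := by
  induction toks using pvGA.induct with
  | case1 => simp [pvGA]
  | case2 t ht =>
    intro w hw
    simp [pvGA, ht] at hw
    subst hw; exact h _ (by simp)
  | case3 t ht u r ih =>
    intro w hw
    simp only [pvGA, ht, if_true, List.mem_cons] at hw
    rcases hw with rfl | rfl | hw
    · have h1 := h t (by simp)
      have h2 := h u (by simp)
      intro c hc
      simp only [String.toList_append] at hc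
      rcases List.mem_append.mp hc with hc | hc
      · rcases List.mem_append.mp hc with hc | hc
        · exact h1 c hc
        · exact h2 c hc
      · simp at hc; subst hc; decide
    · intro c hc; simp at hc
    · exact ih (fun t' ht' => h t' (by simp [ht'])) w hw
  | case4 t rest ht ih =>
    intro w hw
    cases rest with
    | nil =>
      simp [pvGA, ht] at hw
      subst hw; exact h _ (by simp)
    | cons u r =>
      simp only [pvGA, ht, if_false, List.mem_cons] at hw
      rcases hw with rfl | hw
      · exact h w (by simp)
      · exact ih (fun t' ht' => h t' (by simp [ht'])) w hw

theorem pv_append_gt_ne (s u : String) : s ++ u ++ ">" ≠ "" := by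
  intro h
  have := congrArg String.toList h
  simp [String.toList_append] at this

theorem pv_filter_GA (toks : List String) (h : ∀ t ∈ toks, t ≠ "") :
    (pvGA toks).filter (fun x => !(x == "")) = pvMerge toks := by
  induction toks using pvGA.induct with
  | case1 => simp [pvGA, pvMerge]
  | case2 t ht =>
    have := h t (by simp)
    simp [pvGA, pvMerge, ht, List.filter_cons, this]
  | case3 t ht u r ih =>
    have hm := pv_append_gt_ne t u
    simp only [pvGA, pvMerge, ht, if_true]
    rw [List.filter_cons_of_pos (by simpa using hm)]
    rw [List.filter_cons_of_neg (by simp)]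
    rw [ih (fun t' ht' => h t' (by simp [ht']))]
  | case4 t rest ht ih =>
    have h1 := h t (by simp)
    cases rest with
    | nil => simp [pvGA, pvMerge, ht, List.filter_cons, h1]
    | cons u r =>
      simp only [pvGA, pvMerge, ht, if_false]
      rw [List.filter_cons_of_pos (by simpa using h1)]
      rw [ih (fun t' ht' => h t' (by simp [ht']))]
-- ===== VERDICT (by name: the statement is the Claim_ definition above) =====
theorem process_spec : Claim_equal_process := by
  intro s _
  show process s = process_alt s
  have ha : process s = PySem.Str.join " " (PySem.Str.split₀ (PySem.Str.strip (PySem.Str.join " "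
      ((List.range (PySem.Str.split₀ (pvSubst s)).length).foldl pvStep
        (PySem.Str.split₀ (pvSubst s)))))) := rfl
  have hb : process_alt s = PySem.Str.join " " (pvMerge (PySem.Str.split₀ (pvSubst s))) := rfl
  rw [ha, hb]
  have hgood := pv_split₀_good (pvSubst s)
  rw [pv_foldA_eq]
  rw [pv_chain _ (pv_GA_noSpace _ (fun t ht => (hgood t ht).2))]
  rw [pv_filter_GA _ (fun t ht => (hgood t ht).1)]
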